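-- pv_equiv track=rewrite | github.com/Bernardo-Alvess/Ulbra | quarto semestre/Estrutura de dados/ap2/parteInterativaAp2.py | f
-- ===== SOURCE A (Python) =====
-- def f(vetor, n):
--     if n == 0:
--         return 0
--     else:
--         s = f(vetor, n - 1)
--         if vetor[n-1] > 0:
--             s = s + vetor[n-1]
--         return s
-- ===== SOURCE B (Python) =====
-- def f(vetor, n):
--     # Iterative accumulator loop instead of recursion on n.
--     s = 0
--     for i in range(n):
--         if vetor[i] > 0:
--             s = s + vetor[i]
--     return s
-- ===== Notes on version B (the rewrite author's own statement) =====
-- stated objective: idiomatic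
-- what changed: Replaces the recursion over the index n with a flat iterative accumulator loop over range(n).
import Mathlib
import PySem

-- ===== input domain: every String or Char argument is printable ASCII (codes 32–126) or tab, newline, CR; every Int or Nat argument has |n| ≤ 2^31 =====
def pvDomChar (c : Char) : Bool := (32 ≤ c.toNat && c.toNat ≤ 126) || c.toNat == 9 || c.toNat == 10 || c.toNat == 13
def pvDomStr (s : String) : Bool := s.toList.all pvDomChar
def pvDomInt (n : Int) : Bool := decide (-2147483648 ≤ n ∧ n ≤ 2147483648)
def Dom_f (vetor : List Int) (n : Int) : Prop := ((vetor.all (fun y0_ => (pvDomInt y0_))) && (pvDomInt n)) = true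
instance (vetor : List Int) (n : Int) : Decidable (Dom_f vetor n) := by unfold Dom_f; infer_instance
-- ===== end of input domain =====

-- B replaces A's recursion over the index n with a flat iterative accumulator loop (same result, O(1) stack).


-- ===== PORT A =====
-- A recurses on n; we run that recursion on the fuel n.toNat (for n < 0 A diverges, excluded by Pre_f).
-- vetor[n-1] is ported as pyGetD with default 0: inside Pre_f the index n-1 is always in range, so this is exact there.
def fGo (vetor : List Int) : Nat → Int
  | 0 => 0
  | k+1 =>
    let s := fGo vetor k
    if PySem.List.pyGetD vetor (k : Int) 0 > 0 then s + PySem.List.pyGetD vetor (k : Int) 0 else s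

def f (vetor : List Int) (n : Int) : Int := fGo vetor n.toNat

-- ===== PORT B =====
def f_alt (vetor : List Int) (n : Int) : Int :=
  (PySem.List.pyRange 0 n 1).foldl
    (fun s i => if PySem.List.pyGetD vetor i 0 > 0 then s + PySem.List.pyGetD vetor i 0 else s) 0

-- ===== PRECONDITION & SPEC =====
-- Pre_f: exactly where Python A returns: n ≥ 0 (else infinite recursion) and n ≤ len(vetor) (else IndexError).
def Pre_f (vetor : List Int) (n : Int) : Prop := 0 ≤ n ∧ n ≤ vetor.length
instance (vetor : List Int) (n : Int) : Decidable (Pre_f vetor n) := by unfold Pre_f; infer_instance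
def pvWitness_f : List Int × Int := ([3, -2, 5], 3)

def Spec_f (vetor : List Int) (n : Int) (out : Int) : Prop := out = f_alt vetor n
instance (vetor : List Int) (n : Int) (out : Int) : Decidable (Spec_f vetor n out) := by unfold Spec_f; infer_instance

-- ===== CLAIM (what is proved, stated in full; the proofs are below) =====
def Claim_equal_f : Prop := ∀ (vetor : List Int) (n : Int), Dom_f vetor n → Pre_f vetor n → Spec_f vetor n (f vetor n)

-- ===== LEMMAS AND PROOFS =====
theorem fGo_eq_foldl (vetor : List Int) (k : Nat) :
    fGo vetor k = (PySem.List.pyRange 0 (k : Int) 1).foldl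
      (fun s i => if PySem.List.pyGetD vetor i 0 > 0 then s + PySem.List.pyGetD vetor i 0 else s) 0 := by
  induction k with
  | zero => simp [fGo]
  | succ k ih =>
    have h : ((k : Int) + 1) = ((k + 1 : Nat) : Int) := by push_cast; ring
    rw [fGo, ← h, PySem.List.pyRange_one_succ_right (by positivity), List.foldl_append, ih]
    simp

-- ===== VERDICT (by name: the statement is the Claim_ definition above) =====
theorem f_spec : Claim_equal_f := by
  intro vetor n _ hpre
  have hn : ((n.toNat : Nat) : Int) = n := Int.toNat_of_nonneg hpre.1
  unfold Spec_f f f_alt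
  rw [fGo_eq_foldl, hn]
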